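-- pv_equiv track=rewrite | github.com/avllgrn/2CM8Parcial1 | ejemplo.py | generaMatrizConteoIzqDerArrAba
-- ===== SOURCE A (Python) =====
-- def generaMatrizCeros(m, n):
--     M = []
--     for i in range(m):
--         fila = []
--         for j in range(n):
--             fila.append( 0 )
--         M.append( fila )
--     return M
--
-- def generaMatrizConteoIzqDerArrAba(m, n, ini, inc):
--     M = generaMatrizCeros(m,n)
--
--     contador = ini
--     for i in range(m):
--         for j in range(n):
--             M[i][j] = contador
--             contador += inc
--
--     return M
-- ===== SOURCE B (Python) =====
-- def generaMatrizConteoIzqDerArrAba(m, n, ini, inc):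
--     # Build the whole sequence in one flat pass, then reshape into m rows by slicing.
--     if m <= 0:
--         return []
--     flat = []
--     contador = ini
--     for _ in range(m * n):
--         flat.append(contador)
--         contador += inc
--     return [flat[r * n:(r + 1) * n] for r in range(m)]
-- ===== Notes on version B (the rewrite author's own statement) =====
-- stated objective: alternative
-- what changed: Replaces the allocate-zeros-then-nested-fill loop by a single flat pass that builds the whole arithmetic sequence and a reshape step that slices it into rows.
import Mathlib
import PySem

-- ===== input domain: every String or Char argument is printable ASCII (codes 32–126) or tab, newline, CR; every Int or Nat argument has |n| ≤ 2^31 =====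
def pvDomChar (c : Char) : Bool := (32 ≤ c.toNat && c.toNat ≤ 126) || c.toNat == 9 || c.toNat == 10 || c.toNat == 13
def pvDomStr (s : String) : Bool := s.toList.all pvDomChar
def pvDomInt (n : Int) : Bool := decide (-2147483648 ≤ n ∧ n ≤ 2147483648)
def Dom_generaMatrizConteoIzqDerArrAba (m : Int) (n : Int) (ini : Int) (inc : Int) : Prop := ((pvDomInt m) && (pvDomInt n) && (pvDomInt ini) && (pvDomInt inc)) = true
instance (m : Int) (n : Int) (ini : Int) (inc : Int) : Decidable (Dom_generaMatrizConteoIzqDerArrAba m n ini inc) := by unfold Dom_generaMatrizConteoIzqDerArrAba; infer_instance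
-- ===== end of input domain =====

-- B replaces the allocate-zeros-then-nested-fill of A by one flat counter pass plus a
-- row-slicing reshape; same asymptotic cost, proved to return the same matrix.

-- ===== PORT A =====
-- helper generaMatrizCeros: builds the m×n zero matrix by appending rows of appended zeros
def generaMatrizCerosPort (m : Int) (n : Int) : List (List Int) :=
  (PySem.List.pyRange 0 m 1).foldl
    (fun M _ =>
      M ++ [(PySem.List.pyRange 0 n 1).foldl (fun fila _ => fila ++ [(0 : Int)]) []]) []

-- M[i][j] = contador is ported as a functional set at indices i,j (always in range here,
-- since i,j come from range(m)/range(n) and M is the m×n zero matrix; .toNat is exact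
-- because range(m) yields only nonnegative i,j)
def generaMatrizConteoIzqDerArrAba (m : Int) (n : Int) (ini : Int) (inc : Int) : List (List Int) :=
  let M := generaMatrizCerosPort m n
  let s := (PySem.List.pyRange 0 m 1).foldl
    (fun (s : List (List Int) × Int) i =>
      (PySem.List.pyRange 0 n 1).foldl
        (fun (s2 : List (List Int) × Int) j =>
          (s2.1.set i.toNat ((s2.1.getD i.toNat []).set j.toNat s2.2), s2.2 + inc)) s)
    (M, ini)
  s.1

-- ===== PORT B =====
def generaMatrizConteoIzqDerArrAba_alt (m : Int) (n : Int) (ini : Int) (inc : Int) : List (List Int) :=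
  if m ≤ 0 then []
  else
  let fs := (PySem.List.pyRange 0 (m * n) 1).foldl
    (fun (s : List Int × Int) _ => (s.1 ++ [s.2], s.2 + inc)) ([], ini)
  (PySem.List.pyRange 0 m 1).map
    (fun r => PySem.List.slice fs.1 (some (r * n)) (some ((r + 1) * n)))

-- ===== PRECONDITION & SPEC =====
def Spec_generaMatrizConteoIzqDerArrAba (m : Int) (n : Int) (ini : Int) (inc : Int) (out : List (List Int)) : Prop := out = generaMatrizConteoIzqDerArrAba_alt m n ini inc
instance (m : Int) (n : Int) (ini : Int) (inc : Int) (out : List (List Int)) : Decidable (Spec_generaMatrizConteoIzqDerArrAba m n ini inc out) := by unfold Spec_generaMatrizConteoIzqDerArrAba; infer_instance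

-- ===== CLAIM (what is proved, stated in full; the proofs are below) =====
def Claim_equal_generaMatrizConteoIzqDerArrAba : Prop := ∀ (m : Int) (n : Int) (ini : Int) (inc : Int), Dom_generaMatrizConteoIzqDerArrAba m n ini inc → Spec_generaMatrizConteoIzqDerArrAba m n ini inc (generaMatrizConteoIzqDerArrAba m n ini inc)

-- ===== LEMMAS AND PROOFS =====

-- the common closed form both sides are reduced to
def pvRowF (n ini inc : Int) (i : Nat) : List Int :=
  (List.range n.toNat).map (fun j => ini + ((i * n.toNat + j : Nat) : Int) * inc)

-- append-style fold = replicate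
theorem pv_foldl_append_const {α β : Type} (L : List α) (x : β) (acc : List β) :
    L.foldl (fun M _ => M ++ [x]) acc = acc ++ List.replicate L.length x := by
  induction L generalizing acc with
  | nil => simp
  | cons a L ih => simp [List.foldl_cons, ih, List.replicate_succ]
    
theorem pv_zeros_eq (m n : Int) :
    generaMatrizCerosPort m n
      = List.replicate (m).toNat (List.replicate (n).toNat (0 : Int)) := by
  unfold generaMatrizCerosPort
  rw [pv_foldl_append_const, pv_foldl_append_const]
  simp [PySem.List.length_pyRange_one]

-- B's flat pass builds the arithmetic sequence
theorem pv_flat_fold (inc : Int) (L : List Int) (acc : List Int) (c : Int) :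
    L.foldl (fun (s : List Int × Int) _ => (s.1 ++ [s.2], s.2 + inc)) (acc, c)
      = (acc ++ (List.range L.length).map (fun (k : Nat) => c + (k : Int) * inc),
         c + (L.length : Int) * inc) := by
  induction L generalizing acc c with
  | nil => simp
  | cons a L ih =>
      rw [List.foldl_cons, ih]
      have h : (List.range (L.length + 1)).map (fun (k : Nat) => c + (k : Int) * inc)
          = c :: (List.range L.length).map (fun (k : Nat) => (c + inc) + (k : Int) * inc) := by
        rw [List.range_succ_eq_map]
        simp only [List.map_cons, List.map_map, Nat.cast_zero, zero_mul, add_zero]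
        exact congrArg _ (List.map_congr_left (fun a _ => by simp [Function.comp]; ring))
      simp only [Prod.mk.injEq, List.length_cons, h]
      refine ⟨by simp, by push_cast; ring⟩
    
-- A's inner loop threads the whole matrix but only touches row i and the counter
theorem pv_inner_thread {α : Type} (inc : Int) (p : α → Nat) (js : List α) (i : Nat)
    (M : List (List Int)) (c : Int) (hi : i < M.length) :
    js.foldl (fun (s2 : List (List Int) × Int) j =>
        (s2.1.set i ((s2.1.getD i []).set (p j) s2.2), s2.2 + inc)) (M, c)
      = (M.set i ((js.foldl (fun (s : List Int × Int) j => (s.1.set (p j) s.2, s.2 + inc))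
            (M.getD i [], c)).1),
         c + (js.length : Int) * inc) := by
  induction js generalizing M c with
  | nil =>
      simp [List.getD_eq_getElem?_getD, List.getElem?_eq_getElem hi]
  | cons j js ih =>
      rw [List.foldl_cons, List.foldl_cons]
      rw [ih _ _ (by simpa using hi)]
      simp only [List.set_set, List.length_cons, Prod.mk.injEq]
      constructor
      · congr 1
        simp [List.getD_eq_getElem?_getD, List.getElem?_set_self hi]
      · push_cast; ring

-- filling positions 0..N-1 of a row with the running counter
theorem pv_rowFill (inc c : Int) (row : List Int) (N : Nat) (hN : N ≤ row.length) :
    (List.range N).foldl (fun (s : List Int × Int) (j : Nat) => (s.1.set j s.2, s.2 + inc)) (row, c)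
      = ((List.range N).map (fun (j : Nat) => c + (j : Int) * inc) ++ row.drop N,
         c + (N : Int) * inc) := by
  induction N with
  | zero => simp
  | succ N ih =>
      rw [List.range_succ, List.foldl_append, ih (by omega)]
      simp only [List.foldl_cons, List.foldl_nil, List.map_append, List.map_cons, List.map_nil,
        Prod.mk.injEq]
      constructor
      · rw [List.set_append_right _ _
          (show ((List.range N).map (fun (j : Nat) => c + (j : Int) * inc)).length ≤ N by simp)]
        simp only [List.length_map, List.length_range, Nat.sub_self]
        rw [List.drop_eq_getElem_cons (by omega : N < row.length), List.set_cons_zero]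
        simp [List.append_assoc]
      · push_cast; ring

-- A's outer loop: after K rows, the first K rows are filled and the counter advanced
theorem pv_outer (n ini inc : Int) (mN K : Nat) (hK : K ≤ mN) :
    (List.range K).foldl (fun (s : List (List Int) × Int) (i : Nat) =>
        (List.range n.toNat).foldl
          (fun (s2 : List (List Int) × Int) (j : Nat) =>
            (s2.1.set i ((s2.1.getD i []).set j s2.2), s2.2 + inc)) s)
      (List.replicate mN (List.replicate n.toNat 0), ini)
      = ((List.range K).map (pvRowF n ini inc)
           ++ List.replicate (mN - K) (List.replicate n.toNat (0 : Int)),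
         ini + (K : Int) * ((n.toNat : Int) * inc)) := by
  induction K with
  | zero => simp
  | succ K ih =>
      rw [List.range_succ, List.foldl_append, ih (by omega)]
      simp only [List.foldl_cons, List.foldl_nil]
      have hlenmap : ((List.range K).map (pvRowF n ini inc)).length = K := by simp
      have hlen : (((List.range K).map (pvRowF n ini inc))
          ++ List.replicate (mN - K) (List.replicate n.toNat (0 : Int))).length = mN := by
        simp; omega
      have hKlt : K < ((List.range K).map (pvRowF n ini inc)
          ++ List.replicate (mN - K) (List.replicate n.toNat (0 : Int))).length := by
        rw [hlen]; omega
      rw [pv_inner_thread inc (fun (j : Nat) => j) (List.range n.toNat) K _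
        (ini + (K : Int) * ((n.toNat : Int) * inc)) hKlt]
      have hgetD : (((List.range K).map (pvRowF n ini inc))
          ++ List.replicate (mN - K) (List.replicate n.toNat (0 : Int))).getD K []
          = List.replicate n.toNat (0 : Int) := by
        rw [List.getD_eq_getElem?_getD, List.getElem?_append_right (le_of_eq hlenmap),
          hlenmap, Nat.sub_self]
        simp [show 0 < mN - K by omega]
      rw [hgetD, pv_rowFill inc _ _ n.toNat (by simp)]
      simp only [List.drop_replicate, Nat.sub_self, List.replicate_zero, List.append_nil,
        Prod.mk.injEq]
      constructor
      · rw [List.set_append_right _ _ (le_of_eq hlenmap)]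
        simp only [hlenmap, Nat.sub_self]
        have hrep : mN - K = (mN - (K + 1)) + 1 := by omega
        rw [hrep, List.replicate_succ, List.set_cons_zero]
        rw [List.map_append, List.map_cons, List.map_nil, List.append_assoc,
          List.singleton_append]
        congr 2
        unfold pvRowF
        refine (List.map_congr_left (fun a _ => ?_)).symm
        push_cast
        ring
      · simp; ring

-- (m*n).toNat factors when m > 0
theorem pv_toNat_mul (m n : Int) (hm : 0 < m) : (m * n).toNat = m.toNat * n.toNat := by
  rcases le_or_gt n 0 with hn | hn
  · rw [Int.toNat_of_nonpos (mul_nonpos_iff.mpr (Or.inl ⟨le_of_lt hm, hn⟩))]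
    rw [Int.toNat_of_nonpos hn]
    simp
  · have : m * n = ((m.toNat * n.toNat : Nat) : Int) := by
      push_cast
      rw [Int.toNat_of_nonneg (le_of_lt hm), Int.toNat_of_nonneg (le_of_lt hn)]
    rw [this, Int.toNat_natCast]

-- one slice of B's flat sequence is one row of the closed form
theorem pv_slice_row (n ini inc : Int) (mN : Nat) (k : Nat) (hk : k < mN) :
    PySem.List.slice ((List.range (mN * n.toNat)).map (fun (j : Nat) => ini + (j : Int) * inc))
        (some ((k : Int) * n)) (some (((k : Int) + 1) * n))
      = pvRowF n ini inc k := by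
  rcases le_or_gt n 0 with hn | hn
  · have hflat : mN * n.toNat = 0 := by rw [Int.toNat_of_nonpos hn]; ring
    have h0 : ((List.range (mN * n.toNat)).map (fun (j : Nat) => ini + (j : Int) * inc)) = [] := by
      rw [hflat]; simp
    rw [h0]
    have : pvRowF n ini inc k = [] := by
      unfold pvRowF; rw [Int.toNat_of_nonpos hn]; simp
    rw [this]
    refine List.eq_nil_of_length_eq_zero ?_
    rw [PySem.List.length_slice]
    have h1 := PySem.List.clampIdx_le (n := (0:Nat).succ - 1) (i := ((k : Int) + 1) * n)
    simp at h1 ⊢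
    omega
  · have e1 : (k : Int) * n = ((k * n.toNat : Nat) : Int) := by
      push_cast; rw [Int.toNat_of_nonneg (le_of_lt hn)]
    have e2 : ((k : Int) + 1) * n = ((k * n.toNat : Nat) : Int) + ((n.toNat : Nat) : Int) := by
      push_cast; rw [Int.toNat_of_nonneg (le_of_lt hn)]; ring
    rw [e1, e2, PySem.List.slice_natCast_add]
    have hle : (k + 1) * n.toNat ≤ mN * n.toNat := Nat.mul_le_mul_right _ (by omega)
    have hfe : (k + 1) * n.toNat = k * n.toNat + n.toNat := by rw [Nat.succ_mul]
    refine List.ext_getElem ?_ ?_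
    · simp [pvRowF]
      omega
    · intro i h1 h2
      have hi : i < n.toNat := by simp [pvRowF] at h2; omega
      simp only [pvRowF, List.getElem_take, List.getElem_drop, List.getElem_map,
        List.getElem_range]

-- pyRange 0 t 1 as a mapped Nat range
theorem pv_pyRange_zero (t : Int) :
    PySem.List.pyRange 0 t 1 = (List.range t.toNat).map (fun (k : Nat) => (k : Int)) := by
  rw [PySem.List.pyRange_one]
  simp

theorem pv_pyRange_nonpos (t : Int) (h : t ≤ 0) : PySem.List.pyRange 0 t 1 = [] := by
  rw [pv_pyRange_zero, Int.toNat_of_nonpos h]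
  simp

-- ===== VERDICT (by name: the statement is the Claim_ definition above) =====
theorem generaMatrizConteoIzqDerArrAba_spec : Claim_equal_generaMatrizConteoIzqDerArrAba := by
  intro m n ini inc _
  unfold Spec_generaMatrizConteoIzqDerArrAba
  unfold generaMatrizConteoIzqDerArrAba generaMatrizConteoIzqDerArrAba_alt
  dsimp only
  rcases le_or_gt m 0 with hm | hm
  · rw [pv_pyRange_nonpos m hm, if_pos hm]
    simp [generaMatrizCerosPort, pv_pyRange_nonpos m hm]
  · rw [if_neg (by omega : ¬ m ≤ 0)]
    rw [pv_zeros_eq, pv_pyRange_zero m, List.foldl_map, List.map_map]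
    rw [pv_pyRange_zero n]
    simp only [List.foldl_map, Int.toNat_natCast, Function.comp_def]
    rw [pv_outer n ini inc m.toNat m.toNat (Nat.le_refl _)]
    rw [pv_flat_fold inc _ [] ini]
    simp only [List.nil_append, PySem.List.length_pyRange_one, Int.sub_zero,
      Nat.sub_self, List.replicate_zero, List.append_nil]
    rw [pv_toNat_mul m n hm]
    refine List.map_congr_left (fun k hk => ?_)
    rw [List.mem_range] at hk
    exact (pv_slice_row n ini inc m.toNat k hk).symm
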